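-- pv_equiv track=rewrite | github.com/Brahim2000/Ranking-aggregation-in-abstract-argumentation | scoring_aggregation/pluralityloser.py | plurality_sequential_loser_aggregation
-- ===== SOURCE A (Python) =====
-- def plurality_sequential_loser_aggregation(rankings):
--     """
--     Aggregates rankings sequentially using the Plurality scoring rule and the Sequential Loser method.
--     Returns a list of lists where items with the same score are grouped together.
--     """
--     aggregated_rankings = []
--     remaining_rankings = rankings.copy()
--
--     # Collect all unique items from the rankings
--     items = set()
--     for ranking in rankings:
--         for sublist in ranking:
--             items.update(sublist)
--
--     scores = {item: 0 for item in items}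
--
--     # Calculate initial scores based on rankings
--     for ranking in rankings:
--         if ranking:
--             for sublist in ranking:
--                 if sublist:  # Check if sublist is not empty
--                     for item in sublist:
--                         scores[item] += 1
--                     break  # Only the top-ranked items get a score of 1
--
--     # Sequential Loser process
--     while scores:
--         # Find the item with the lowest score
--         lowest_score_item = min(scores, key=scores.get)
--         lowest_score = scores[lowest_score_item]
--
--         # Group items with the same lowest score
--         lowest_score_group = [item for item, score in scores.items() if score == lowest_score]
--         aggregated_rankings.insert(0, lowest_score_group)  # Insert at the beginning to rank them at the bottom
--
--         # Remove the lowest score items from scores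
--         for item in lowest_score_group:
--             del scores[item]
--
--         # Recalculate scores for the remaining items
--         scores = {item: 0 for item in scores}
--         for ranking in remaining_rankings:
--             if ranking:
--                 for sublist in ranking:
--                     if sublist:  # Check if sublist is not empty
--                         for item in sublist:
--                             if item in scores:  # Only consider remaining items
--                                 scores[item] += 1
--                         break  # Only the top-ranked items get a score of 1
--
--     return aggregated_rankings
-- ===== SOURCE B (Python) =====
-- """Plurality scores never change during sequential-loser elimination: score every item
-- once against each ranking's first non-empty tier, bucket items by score, and emit the
-- buckets by descending score."""
--
-- def _first_nonempty(ranking):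
--     for sublist in ranking:
--         if sublist:
--             return sublist
--     return []
--
-- def plurality_sequential_loser_aggregation(rankings):
--     items = set()
--     for ranking in rankings:
--         for sublist in ranking:
--             items.update(sublist)
--
--     scores = dict.fromkeys(items, 0)
--     for ranking in rankings:
--         for item in _first_nonempty(ranking):
--             scores[item] += 1
--
--     groups = {}
--     for item, sc in scores.items():
--         groups.setdefault(sc, []).append(item)
--     return [groups[s] for s in sorted(groups, reverse=True)]
-- ===== Notes on version B (the rewrite author's own statement) =====
-- stated objective: faster
-- what changed: A repeatedly extracts the minimum-score group and rebuilds the whole score dict from all rankings once per eliminated class; B observes that the plurality scores never change during elimination, scores every item in one pass over the rankings' first non-empty tiers, buckets items by score in a dict, and emits the buckets by descending score.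
import Mathlib
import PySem

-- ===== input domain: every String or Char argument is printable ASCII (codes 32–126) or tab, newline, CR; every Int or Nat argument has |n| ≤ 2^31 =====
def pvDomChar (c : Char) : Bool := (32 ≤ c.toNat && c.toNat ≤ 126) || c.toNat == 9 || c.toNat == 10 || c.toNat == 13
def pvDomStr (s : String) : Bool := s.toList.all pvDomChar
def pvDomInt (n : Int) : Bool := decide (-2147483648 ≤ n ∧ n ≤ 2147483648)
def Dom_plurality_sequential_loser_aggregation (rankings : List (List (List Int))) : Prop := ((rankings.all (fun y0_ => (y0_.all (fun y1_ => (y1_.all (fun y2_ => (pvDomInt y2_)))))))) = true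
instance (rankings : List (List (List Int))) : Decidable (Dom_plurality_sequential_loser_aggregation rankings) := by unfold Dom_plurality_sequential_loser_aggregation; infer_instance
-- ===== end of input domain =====

-- B scores every item once against each ranking's first non-empty tier and emits the score
-- classes from lowest to highest, instead of A's repeated minimum-extraction with a full
-- rescoring pass per eliminated class.

-- ===== PORT A =====
-- Python iterates a CPython 'set' of ints, whose iteration order is hash-table order, not
-- insertion order; the set is therefore modelled by the CPython 3.11 table itself (open
-- addressing, LINEAR_PROBES = 9, perturb >>= 5, resize to used*4 when fill*5 >= mask*3),
-- with hash(n) = n (hash(-1) = -2) as an unsigned 64-bit size_t — exact for int elements.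
-- (Both Pythons build this set from the same insertion sequence, so the model is shared.)
structure PvSet where
  table : List (Option Int)
  fill : Nat
  used : Nat
deriving Repr, DecidableEq

def pvHashU (n : Int) : Nat := (((if n = -1 then -2 else n) % (18446744073709551616 : Int))).toNat

-- first empty slot among table[j], table[j+1], …, table[j+cnt-1]
def pvScanNoneFrom (table : List (Option Int)) : Nat → Nat → Option Nat
  | _, 0 => none
  | j, cnt+1 => if table.getD j none = none then some j else pvScanNoneFrom table (j+1) cnt

-- set_insert_clean (reinsertion during resize); the fuel only makes the probe loop structural
-- (the table always has an empty slot, found long before table.length + 64 probes)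
def pvInsertClean (key : Int) (table : List (Option Int)) : Nat → Nat → Nat → List (Option Int)
  | 0, _, _ => table
  | fuel+1, i, perturb =>
    if table.getD i none = none then table.set i (some key)
    else match (if i + 9 ≤ table.length - 1 then pvScanNoneFrom table (i+1) 9 else none) with
      | some j => table.set j (some key)
      | none => pvInsertClean key table fuel ((i*5 + 1 + perturb/32) % table.length) (perturb/32)

-- newsize = PySet_MINSIZE; while newsize <= minused: newsize <<= 1
def pvGrow : Nat → Nat → Nat → Nat
  | 0, newsize, _ => newsize
  | f+1, newsize, minused => if newsize ≤ minused then pvGrow f (newsize*2) minused else newsize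

def pvResize (st : PvSet) (minused : Nat) : PvSet :=
  let newsize := pvGrow 64 8 minused
  let t := st.table.foldl (fun t e =>
    match e with
    | none => t
    | some k => pvInsertClean k t (t.length + 64) (pvHashU k % t.length) (pvHashU k))
    (List.replicate newsize (none : Option Int))
  { table := t, fill := st.used, used := st.used }

-- the inner probe scan of set_add_entry over slots j, …, j+cnt-1:
-- some (some j) = first unused slot, some none = key already present, none = keep probing
def pvProbeSlots (key : Int) (table : List (Option Int)) : Nat → Nat → Option (Option Nat)
  | _, 0 => none
  | j, cnt+1 =>
    match table.getD j none with
    | none => some (some j)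
    | some e => if pvHashU e = pvHashU key ∧ e = key then some none
                else pvProbeSlots key table (j+1) cnt

def pvAddLoop (key : Int) : Nat → PvSet → Nat → Nat → PvSet
  | 0, st, _, _ => st
  | fuel+1, st, i, perturb =>
    let mask := st.table.length - 1
    match pvProbeSlots key st.table i ((if i + 9 ≤ mask then 9 else 0) + 1) with
    | some none => st
    | some (some j) =>
      let st' : PvSet := { table := st.table.set j (some key), fill := st.fill + 1, used := st.used + 1 }
      if st'.fill * 5 ≥ mask * 3 then
        pvResize st' (if st'.used > 50000 then st'.used * 2 else st'.used * 4)
      else st'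
    | none => pvAddLoop key fuel st ((i*5 + 1 + perturb/32) % st.table.length) (perturb/32)

def pvSetAdd (st : PvSet) (key : Int) : PvSet :=
  pvAddLoop key (st.table.length + 64) st (pvHashU key % st.table.length) (pvHashU key)

def pvSetEmpty : PvSet := { table := List.replicate 8 none, fill := 0, used := 0 }

-- items = set(); for ranking in rankings: for sublist in ranking: items.update(sublist);
-- iterating the set = slot order
def pvCollectItems (rankings : List (List (List Int))) : List Int :=
  (rankings.foldl (fun st ranking => ranking.foldl (fun st sub => sub.foldl pvSetAdd st) st)
    pvSetEmpty).table.filterMap id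

-- {item: 0 for item in ks}
def pvInitScores (ks : List Int) : PySem.Dict Int Int :=
  ks.foldl (fun d k => d.insert k 0) PySem.Dict.empty

-- 'for sublist in ranking: if sublist: (for item in sublist: scores[item] += 1); break'
-- (scores[item] += 1: item is always a key of scores here, so modify is exact)
def pvScoreRanking (subs : List (List Int)) (d : PySem.Dict Int Int) : PySem.Dict Int Int :=
  match subs with
  | [] => d
  | sub :: rest =>
    if sub ≠ [] then sub.foldl (fun d item => d.modify item 0 (· + 1)) d
    else pvScoreRanking rest d

-- A's recalculation variant with the 'if item in scores' guard
def pvRescoreRanking (subs : List (List Int)) (d : PySem.Dict Int Int) : PySem.Dict Int Int :=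
  match subs with
  | [] => d
  | sub :: rest =>
    if sub ≠ [] then sub.foldl (fun d item => if d.contains item then d.modify item 0 (· + 1) else d) d
    else pvRescoreRanking rest d

-- the 'while scores:' loop; min? = none exactly when the dict is empty (the while guard),
-- and every iteration deletes at least one key, so fuel scores.size + 1 is never exhausted
def pvLoserLoop (rankings : List (List (List Int))) : Nat → PySem.Dict Int Int → List (List Int) → List (List Int)
  | 0, _, acc => acc
  | fuel+1, scores, acc =>
    match PySem.List.min? scores.keys (fun k => scores.getD k 0) with  -- min(scores, key=scores.get)
    | none => acc
    | some m =>
      let lowest := scores.getD m 0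
      let group := (scores.items.filter (fun p => p.2 == lowest)).map (·.1)
      let scores1 := group.foldl (fun d k => d.erase k) scores
      let scores2 := pvInitScores scores1.keys        -- {item: 0 for item in scores}
      let scores3 := rankings.foldl (fun d ranking => if ranking ≠ [] then pvRescoreRanking ranking d else d) scores2
      pvLoserLoop rankings fuel scores3 (group :: acc)   -- aggregated_rankings.insert(0, group)

def plurality_sequential_loser_aggregation (rankings : List (List (List Int))) : List (List Int) :=
  let items := pvCollectItems rankings
  let scores := rankings.foldl (fun d ranking => if ranking ≠ [] then pvScoreRanking ranking d else d)
    (pvInitScores items)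
  pvLoserLoop rankings (scores.size + 1) scores []

-- ===== PORT B =====
-- B's port of the same CPython set primitive, written as a probe-sequence search instead
-- of A's recursive probe loops: enumerate the jump points, expand each jump into its probe
-- chunk, and act on the first hit (an empty slot, or the key itself already in the table).
def bJumps (len : Nat) : Nat → Nat → Nat → List Nat
  | 0, _, _ => []
  | fuel+1, i, perturb => i :: bJumps len fuel ((i*5 + 1 + perturb/32) % len) (perturb/32)

def bChunk (len i : Nat) : List Nat :=
  i :: (if i + 9 ≤ len - 1 then (List.range 9).map (fun t => i + 1 + t) else [])

def bProbes (len fuel i perturb : Nat) : List Nat :=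
  (bJumps len fuel i perturb).flatMap (bChunk len)

def bHit (table : List (Option Int)) (key : Int) (q : Nat) : Bool :=
  match table.getD q none with
  | none => true
  | some e => pvHashU e == pvHashU key && e == key

def bGrow (minused : Nat) : Nat :=
  (List.range 64).foldl (fun ns _ => if ns ≤ minused then ns * 2 else ns) 8

def bCleanIns (t : List (Option Int)) (k : Int) : List (Option Int) :=
  match (bProbes t.length (t.length + 64) (pvHashU k % t.length) (pvHashU k)).find?
      (fun q => t.getD q none == none) with
  | some j => t.set j (some k)
  | none => t

def bResize (st : PvSet) (minused : Nat) : PvSet :=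
  { table := (st.table.filterMap id).foldl bCleanIns
      (List.replicate (bGrow minused) (none : Option Int)),
    fill := st.used, used := st.used }

def bSetAdd (st : PvSet) (key : Int) : PvSet :=
  match (bProbes st.table.length (st.table.length + 64)
      (pvHashU key % st.table.length) (pvHashU key)).find? (bHit st.table key) with
  | none => st
  | some q =>
    match st.table.getD q none with
    | some _ => st
    | none =>
      let st' : PvSet := { table := st.table.set q (some key), fill := st.fill + 1,
                           used := st.used + 1 }
      if st'.fill * 5 ≥ (st.table.length - 1) * 3 then
        bResize st' (if st'.used > 50000 then st'.used * 2 else st'.used * 4)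
      else st'

-- _first_nonempty(ranking)
def pvTop : List (List Int) → List Int
  | [] => []
  | sub :: rest => if sub ≠ [] then sub else pvTop rest

def plurality_sequential_loser_aggregation_alt (rankings : List (List (List Int))) : List (List Int) :=
  -- items = set(); for ranking: for sublist: items.update(sublist)
  let items := (rankings.foldl (fun st ranking => ranking.foldl
      (fun st sublist => sublist.foldl bSetAdd st) st) pvSetEmpty).table.filterMap id
  -- scores = dict.fromkeys(items, 0); for ranking: for item in _first_nonempty(ranking): scores[item] += 1
  let scores := rankings.foldl
      (fun d ranking => (pvTop ranking).foldl (fun d item => d.modify item 0 (· + 1)) d)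
      (items.foldl (fun d item => d.insert item 0) (PySem.Dict.empty : PySem.Dict Int Int))
  -- groups = {}; for item, sc in scores.items(): groups.setdefault(sc, []).append(item)
  let groups := scores.items.foldl (fun g p => g.modify p.2 [] (· ++ [p.1]))
      (PySem.Dict.empty : PySem.Dict Int (List Int))
  -- [groups[s] for s in sorted(groups, reverse=True)]
  (PySem.List.sorted groups.keys (fun s => s) true).map (fun s => groups.getD s [])

-- ===== PRECONDITION & SPEC =====
def Spec_plurality_sequential_loser_aggregation (rankings : List (List (List Int))) (out : List (List Int)) : Prop := out = plurality_sequential_loser_aggregation_alt rankings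
instance (rankings : List (List (List Int))) (out : List (List Int)) : Decidable (Spec_plurality_sequential_loser_aggregation rankings out) := by unfold Spec_plurality_sequential_loser_aggregation; infer_instance

-- ===== CLAIM (what is proved, stated in full; the proofs are below) =====
def Claim_equal_plurality_sequential_loser_aggregation : Prop := ∀ (rankings : List (List (List Int))), Dom_plurality_sequential_loser_aggregation rankings → Spec_plurality_sequential_loser_aggregation rankings (plurality_sequential_loser_aggregation rankings)

-- ===== LEMMAS AND PROOFS =====

-- the (loop-invariant) plurality score of item k
def pvW (rankings : List (List (List Int))) (k : Int) : Int :=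
  (rankings.map (fun r => ((pvTop r).count k : Int))).sum

-- the common value of both programs on a key list K: score classes by descending score
def pvClasses (rankings : List (List (List Int))) (K : List Int) : List (List Int) :=
  (PySem.List.sorted (PySem.List.dedup (K.map (pvW rankings))) (fun s => s) true).map
    (fun s => K.filter (fun k => pvW rankings k == s))

lemma scoreRanking_eq (subs : List (List Int)) (d : PySem.Dict Int Int) :
    pvScoreRanking subs d = (pvTop subs).foldl (fun d x => d.modify x 0 (· + 1)) d := by
  induction subs with
  | nil => simp [pvScoreRanking, pvTop]
  | cons sub rest ih => by_cases h : sub = [] <;> simp [pvScoreRanking, pvTop, h, ih]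

lemma rescoreRanking_eq (subs : List (List Int)) (d : PySem.Dict Int Int) :
    pvRescoreRanking subs d
      = (pvTop subs).foldl (fun d x => if d.contains x then d.modify x 0 (· + 1) else d) d := by
  induction subs with
  | nil => simp [pvRescoreRanking, pvTop]
  | cons sub rest ih => by_cases h : sub = [] <;> simp [pvRescoreRanking, pvTop, h, ih]

lemma guard_score :
    (fun (d : PySem.Dict Int Int) (r : List (List Int)) => if r ≠ [] then pvScoreRanking r d else d)
      = fun d r => pvScoreRanking r d := by
  funext d r; cases r <;> simp [pvScoreRanking]

lemma guard_rescore :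
    (fun (d : PySem.Dict Int Int) (r : List (List Int)) => if r ≠ [] then pvRescoreRanking r d else d)
      = fun d r => pvRescoreRanking r d := by
  funext d r; cases r <;> simp [pvRescoreRanking]

lemma getD_spass (rankings : List (List (List Int))) (d : PySem.Dict Int Int) (k : Int) :
    (rankings.foldl (fun d r => pvScoreRanking r d) d).getD k 0 = d.getD k 0 + pvW rankings k := by
  induction rankings generalizing d with
  | nil => simp [pvW]
  | cons r rs ih =>
    rw [List.foldl_cons, ih, scoreRanking_eq, PySem.Dict.getD_foldl_modify_add_one]
    simp only [pvW, List.map_cons, List.sum_cons]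
    ring

lemma nodup_keys_spass (rankings : List (List (List Int))) (d : PySem.Dict Int Int)
    (h : d.keys.Nodup) : (rankings.foldl (fun d r => pvScoreRanking r d) d).keys.Nodup := by
  induction rankings generalizing d with
  | nil => simpa
  | cons r rs ih =>
    simp only [List.foldl_cons]
    refine ih _ ?_
    rw [scoreRanking_eq]
    exact PySem.Dict.nodup_keys_foldl_modify_key _ (fun x => x) 0 (fun _ _ => (· + 1)) d h

lemma keys_gfold (l : List Int) (d : PySem.Dict Int Int) :
    (l.foldl (fun d x => if d.contains x then d.modify x 0 (· + 1) else d) d).keys = d.keys := by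
  induction l generalizing d with
  | nil => simp
  | cons x l ih =>
    simp only [List.foldl_cons]
    by_cases h : d.contains x
    · rw [if_pos h, ih, PySem.Dict.keys_modify, PySem.Dict.keys_insert_of_contains _ _ h]
    · rw [if_neg h, ih]

lemma getD_gfold (l : List Int) (d : PySem.Dict Int Int) (k : Int) :
    (l.foldl (fun d x => if d.contains x then d.modify x 0 (· + 1) else d) d).getD k 0
      = if d.contains k then d.getD k 0 + (l.count k : Int) else d.getD k 0 := by
  induction l generalizing d with
  | nil => simp
  | cons x l ih =>
    simp only [List.foldl_cons]
    by_cases hx : d.contains x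
    · rw [if_pos hx, ih]
      by_cases hkx : k = x
      · subst hkx
        simp [PySem.Dict.contains_modify, hx, List.count_cons_self]
        ring
      · rw [List.count_cons_of_ne (Ne.symm hkx)]
        simp [PySem.Dict.contains_modify, hkx, PySem.Dict.getD_modify]
    · rw [if_neg hx, ih]
      by_cases hkx : k = x
      · subst hkx
        simp [hx]
      · rw [List.count_cons_of_ne (Ne.symm hkx)]

lemma keys_rpass (rankings : List (List (List Int))) (d : PySem.Dict Int Int) :
    (rankings.foldl (fun d r => pvRescoreRanking r d) d).keys = d.keys := by
  induction rankings generalizing d with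
  | nil => simp
  | cons r rs ih =>
    simp only [List.foldl_cons]
    rw [ih, rescoreRanking_eq, keys_gfold]

lemma getD_rpass (rankings : List (List (List Int))) (d : PySem.Dict Int Int) (k : Int) :
    (rankings.foldl (fun d r => pvRescoreRanking r d) d).getD k 0
      = if d.contains k then d.getD k 0 + pvW rankings k else d.getD k 0 := by
  induction rankings generalizing d with
  | nil => simp [pvW]
  | cons r rs ih =>
    simp only [List.foldl_cons, ih]
    have hk : (pvRescoreRanking r d).contains k = d.contains k := by
      rw [PySem.Dict.contains_eq_decide_mem_keys, PySem.Dict.contains_eq_decide_mem_keys,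
        rescoreRanking_eq, keys_gfold]
    rw [hk, rescoreRanking_eq, getD_gfold]
    by_cases h : d.contains k <;> simp [h, pvW, List.map_cons, List.sum_cons]
    ring

lemma keys_init (K : List Int) : (pvInitScores K).keys = PySem.List.dedup K := by
  have h := PySem.Dict.keys_foldl_insert K (fun _ _ => (0 : Int)) PySem.Dict.empty
  simpa [pvInitScores, PySem.List.dedup_eq_ofList, PySem.Dict.keys_empty] using h

lemma getD_init (K : List Int) (k : Int) : (pvInitScores K).getD k 0 = 0 := by
  suffices h : ∀ (d : PySem.Dict Int Int), (∀ j, d.getD j (0 : Int) = 0) →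
      ∀ k, (K.foldl (fun d k => d.insert k 0) d).getD k 0 = 0 by
    exact h _ (fun j => PySem.Dict.getD_empty j 0) k
  induction K with
  | nil => intro d hd k; simpa using hd k
  | cons x K ih =>
    intro d hd k
    simp only [List.foldl_cons]
    refine ih _ (fun j => ?_) k
    rw [PySem.Dict.getD_insert]
    split <;> simp [hd]

lemma dict_char (rankings : List (List (List Int))) (d : PySem.Dict Int Int)
    (hnd : d.keys.Nodup) (hval : ∀ k ∈ d.keys, d.getD k 0 = pvW rankings k) :
    d = PySem.Dict.mk (d.keys.map (fun k => (k, pvW rankings k))) := by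
  apply PySem.Dict.ext
  rw [PySem.Dict.items_eq_map_keys d hnd 0]
  exact List.map_congr_left (fun k hk => by rw [hval k hk])

lemma keys_erase (d : PySem.Dict Int Int) (x : Int) :
    (d.erase x).keys = d.keys.filter (fun k => decide (k ≠ x)) := by
  obtain ⟨l⟩ := d
  simp only [PySem.Dict.erase, PySem.Dict.keys, List.filter_map, Function.comp_def]
  congr 1
  apply List.filter_congr
  intro p _
  by_cases h : p.1 = x <;> simp [h]

lemma keys_foldl_erase (g : List Int) (d : PySem.Dict Int Int) :
    (g.foldl (fun d k => d.erase k) d).keys = d.keys.filter (fun k => decide (k ∉ g)) := by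
  induction g generalizing d with
  | nil => simp
  | cons x g ih =>
    simp only [List.foldl_cons, ih, keys_erase]
    rw [List.filter_filter]
    apply List.filter_congr
    intro k _
    simp [not_or, Bool.and_comm]

lemma length_filter_lt (p : Int → Bool) (l : List Int) (x : Int)
    (hx : x ∈ l) (hp : p x = false) : (l.filter p).length < l.length := by
  induction l with
  | nil => cases hx
  | cons a l ih =>
    rcases List.mem_cons.mp hx with rfl | hx'
    · rw [List.filter_cons_of_neg (by simp [hp])]
      exact Nat.lt_succ_of_le (List.length_filter_le _ _)
    · by_cases ha : p a = true
      · rw [List.filter_cons_of_pos ha]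
        exact Nat.succ_lt_succ (ih hx')
      · rw [List.filter_cons_of_neg (by simpa using ha)]
        exact Nat.lt_succ_of_lt (ih hx')

lemma foldl_add_of_disjoint (l : List Int) : ∀ (t : PySem.Set Int), l.Nodup →
    (∀ x ∈ l, x ∉ t) → l.foldl PySem.Set.add t = t ++ l := by
  induction l with
  | nil => intro t _ _; simp
  | cons a l ih =>
    intro t hnd hdis
    have ha' : a ∉ t := hdis a List.mem_cons_self
    rw [List.foldl_cons]
    have hstep : PySem.Set.add t a = t ++ [a] := by
      simp only [PySem.Set.add]
      rw [if_neg]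
      intro hc
      exact ha' (by simpa using hc)
    rw [hstep, ih (t ++ [a]) (List.Nodup.of_cons hnd) ?_]
    · simp
    · intro x hx
      simp only [List.mem_append, List.mem_singleton, not_or]
      exact ⟨hdis x (List.mem_cons_of_mem _ hx), fun he => (List.nodup_cons.mp hnd).1 (he ▸ hx)⟩

lemma dedup_eq_self (l : List Int) (h : l.Nodup) : PySem.List.dedup l = l := by
  have := foldl_add_of_disjoint l PySem.Set.empty h (by intro x _ hx; cases hx)
  simpa [PySem.List.dedup, PySem.Set.ofList, PySem.Set.empty] using this

lemma classes_step (rankings : List (List (List Int))) (K : List Int) (lowest : Int)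
    (hmem : lowest ∈ K.map (pvW rankings))
    (hmin : ∀ s ∈ K.map (pvW rankings), lowest ≤ s) :
    pvClasses rankings K
      = pvClasses rankings (K.filter (fun k => !(pvW rankings k == lowest)))
        ++ [K.filter (fun k => pvW rankings k == lowest)] := by
  have hV' : ∀ a, a ∈ PySem.List.dedup ((K.filter (fun k => !(pvW rankings k == lowest))).map (pvW rankings))
      ↔ a ∈ K.map (pvW rankings) ∧ a ≠ lowest := by
    intro a
    rw [PySem.List.mem_dedup]
    simp only [List.mem_map, List.mem_filter]
    constructor
    · rintro ⟨k, ⟨hk, h2⟩, rfl⟩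
      exact ⟨⟨k, hk, rfl⟩, by simpa using h2⟩
    · rintro ⟨⟨k, hk, rfl⟩, hne⟩
      exact ⟨k, ⟨hk, by simpa using hne⟩, rfl⟩
  have hndS : (PySem.List.sorted (PySem.List.dedup ((K.filter (fun k => !(pvW rankings k == lowest))).map (pvW rankings))) (fun s => s) true).Nodup :=
    ((PySem.List.sorted_perm _ _ _).nodup_iff).mpr (PySem.List.nodup_dedup _)
  have hmemS : ∀ a, a ∈ PySem.List.sorted (PySem.List.dedup ((K.filter (fun k => !(pvW rankings k == lowest))).map (pvW rankings))) (fun s => s) true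
      ↔ a ∈ K.map (pvW rankings) ∧ a ≠ lowest := by
    intro a; rw [PySem.List.mem_sorted, hV']
  have hsorted : PySem.List.sorted (PySem.List.dedup (K.map (pvW rankings))) (fun s => s) true
      = PySem.List.sorted (PySem.List.dedup ((K.filter (fun k => !(pvW rankings k == lowest))).map (pvW rankings))) (fun s => s) true ++ [lowest] := by
    apply PySem.List.sorted_rev_eq_of_perm_of_pairwise_gt
    · rw [List.perm_ext_iff_of_nodup ?_ (PySem.List.nodup_dedup _)]
      · intro a
        rw [PySem.List.mem_dedup, List.mem_append, hmemS, List.mem_singleton]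
        constructor
        · rintro (⟨h1, _⟩ | rfl)
          · exact h1
          · exact hmem
        · intro h1
          by_cases ha : a = lowest
          · exact Or.inr ha
          · exact Or.inl ⟨h1, ha⟩
      · refine List.Nodup.append hndS (List.nodup_singleton _) ?_
        intro a haS ha1
        rw [List.mem_singleton] at ha1
        exact ((hmemS a).mp haS).2 ha1
    · rw [List.pairwise_append]
      refine ⟨?_, List.pairwise_singleton _ _, ?_⟩
      · have hge := PySem.List.sorted_pairwise_rev (PySem.List.dedup ((K.filter (fun k => !(pvW rankings k == lowest))).map (pvW rankings))) (fun s => s)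
        exact (hge.and hndS).imp (fun {a b} h => lt_of_le_of_ne h.1 (Ne.symm h.2))
      · intro a haS b hb
        rw [List.mem_singleton] at hb
        subst hb
        obtain ⟨h1, h2⟩ := (hmemS a).mp haS
        exact lt_of_le_of_ne (hmin a h1) (Ne.symm h2)
  unfold pvClasses
  rw [hsorted, List.map_append, List.map_singleton]
  congr 1
  apply List.map_congr_left
  intro s hs
  have hsne : s ≠ lowest := ((hmemS s).mp hs).2
  rw [List.filter_filter]
  apply List.filter_congr
  intro k _
  by_cases h : pvW rankings k = s
  · simp [h, hsne]
  · simp [h]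

lemma loop_eq (rankings : List (List (List Int))) :
    ∀ (fuel : Nat) (K : List Int) (acc : List (List Int)), K.Nodup → K.length < fuel →
      pvLoserLoop rankings fuel (PySem.Dict.mk (K.map (fun k => (k, pvW rankings k)))) acc
        = pvClasses rankings K ++ acc := by
  intro fuel
  induction fuel with
  | zero => intro K acc _ h; exact absurd h (Nat.not_lt_zero _)
  | succ fuel ih =>
    intro K acc hnd hlt
    have hkeys : (PySem.Dict.mk (K.map (fun k => (k, pvW rankings k)))).keys = K := by
      simp [PySem.Dict.keys, Function.comp_def]
    have hndk : (PySem.Dict.mk (K.map (fun k => (k, pvW rankings k)))).keys.Nodup := by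
      rw [hkeys]; exact hnd
    have hgetD : ∀ k ∈ K, (PySem.Dict.mk (K.map (fun k => (k, pvW rankings k)))).getD k 0 = pvW rankings k := by
      intro k hk
      exact PySem.Dict.getD_of_mem_items _
        (List.mem_map_of_mem (f := fun k => (k, pvW rankings k)) hk) hndk 0
    by_cases hK : K = []
    · subst hK
      have h0 : PySem.List.min? ([] : List Int)
          (fun k => (PySem.Dict.mk ([] : List (Int × Int))).getD k 0) = none :=
        (PySem.List.min?_eq_none_iff _ _).mpr rfl
      simp [pvLoserLoop, pvClasses, h0]
    · obtain ⟨m, hm⟩ : ∃ m, PySem.List.min? (PySem.Dict.mk (K.map (fun k => (k, pvW rankings k)))).keys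
          (fun k => (PySem.Dict.mk (K.map (fun k => (k, pvW rankings k)))).getD k 0) = some m := by
        cases h : PySem.List.min? (PySem.Dict.mk (K.map (fun k => (k, pvW rankings k)))).keys
            (fun k => (PySem.Dict.mk (K.map (fun k => (k, pvW rankings k)))).getD k 0) with
        | none => exact absurd (by rwa [PySem.List.min?_eq_none_iff, hkeys] at h) hK
        | some m => exact ⟨m, rfl⟩
      have hmK : m ∈ K := by
        have := PySem.List.min?_mem hm
        rwa [hkeys] at this
      have hlow : (PySem.Dict.mk (K.map (fun k => (k, pvW rankings k)))).getD m 0 = pvW rankings m := hgetD m hmK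
      have hmem : pvW rankings m ∈ K.map (pvW rankings) := List.mem_map_of_mem hmK
      have hmin : ∀ s ∈ K.map (pvW rankings), pvW rankings m ≤ s := by
        intro s hs
        rw [List.mem_map] at hs
        obtain ⟨k, hk, rfl⟩ := hs
        have := PySem.List.min?_isMin hm k (by rw [hkeys]; exact hk)
        rwa [hlow, hgetD k hk] at this
      simp only [pvLoserLoop, hm, hlow]
      have hgroup : ((PySem.Dict.mk (K.map (fun k => (k, pvW rankings k)))).items.filter
            (fun p => p.2 == pvW rankings m)).map (·.1)
          = K.filter (fun k => pvW rankings k == pvW rankings m) := by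
        show ((K.map (fun k => (k, pvW rankings k))).filter (fun p => p.2 == pvW rankings m)).map (·.1)
          = K.filter (fun k => pvW rankings k == pvW rankings m)
        rw [List.filter_map, List.map_map]
        simp [Function.comp_def]
      rw [hgroup]
      have hkeys1 : ((K.filter (fun k => pvW rankings k == pvW rankings m)).foldl (fun d k => d.erase k)
            (PySem.Dict.mk (K.map (fun k => (k, pvW rankings k))))).keys
          = K.filter (fun k => !(pvW rankings k == pvW rankings m)) := by
        rw [keys_foldl_erase, hkeys]
        apply List.filter_congr
        intro k hk
        by_cases h : pvW rankings k = pvW rankings m <;>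
          simp [List.mem_filter, h, hk]
      rw [hkeys1]
      have hndK' : (K.filter (fun k => !(pvW rankings k == pvW rankings m))).Nodup := hnd.filter _
      have h2keys : (pvInitScores (K.filter (fun k => !(pvW rankings k == pvW rankings m)))).keys
          = K.filter (fun k => !(pvW rankings k == pvW rankings m)) := by
        rw [keys_init, dedup_eq_self _ hndK']
      have hD3 : rankings.foldl (fun d ranking => if ranking ≠ [] then pvRescoreRanking ranking d else d)
            (pvInitScores (K.filter (fun k => !(pvW rankings k == pvW rankings m))))
          = PySem.Dict.mk ((K.filter (fun k => !(pvW rankings k == pvW rankings m))).map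
              (fun k => (k, pvW rankings k))) := by
        rw [guard_rescore]
        have h3keys : (rankings.foldl (fun d r => pvRescoreRanking r d)
              (pvInitScores (K.filter (fun k => !(pvW rankings k == pvW rankings m))))).keys
            = K.filter (fun k => !(pvW rankings k == pvW rankings m)) := by
          rw [keys_rpass, h2keys]
        have hnd3 : (rankings.foldl (fun d r => pvRescoreRanking r d)
              (pvInitScores (K.filter (fun k => !(pvW rankings k == pvW rankings m))))).keys.Nodup := by
          rw [h3keys]; exact hndK'
        have hval3 : ∀ k ∈ (rankings.foldl (fun d r => pvRescoreRanking r d)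
              (pvInitScores (K.filter (fun k => !(pvW rankings k == pvW rankings m))))).keys,
            (rankings.foldl (fun d r => pvRescoreRanking r d)
              (pvInitScores (K.filter (fun k => !(pvW rankings k == pvW rankings m))))).getD k 0
            = pvW rankings k := by
          intro k hk
          rw [h3keys] at hk
          have hc : (pvInitScores (K.filter (fun k => !(pvW rankings k == pvW rankings m)))).contains k = true := by
            rw [PySem.Dict.contains_eq_decide_mem_keys, h2keys]
            exact decide_eq_true hk
          rw [getD_rpass, hc, if_pos rfl, getD_init]
          ring
        have hchar := dict_char rankings _ hnd3 hval3
        rwa [h3keys] at hchar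
      rw [hD3]
      have hlt' : (K.filter (fun k => !(pvW rankings k == pvW rankings m))).length < fuel := by
        have h1 : (K.filter (fun k => !(pvW rankings k == pvW rankings m))).length < K.length :=
          length_filter_lt _ _ m hmK (by simp)
        omega
      rw [ih _ _ hndK' hlt', classes_step rankings K (pvW rankings m) hmem hmin]
      simp

-- B-side model equivalence: B's probe-sequence search computes A's recursive probe loops
def pvLin : Nat → Nat → List Nat
  | _, 0 => []
  | j, c+1 => j :: pvLin (j+1) c

lemma chunk_eq (len i : Nat) :
    bChunk len i = pvLin i ((if i + 9 ≤ len - 1 then 9 else 0) + 1) := by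
  by_cases h : i + 9 ≤ len - 1 <;>
    simp [bChunk, pvLin, h, List.range_succ]

lemma scan_lin (table : List (Option Int)) :
    ∀ (cnt j : Nat), pvScanNoneFrom table j cnt
      = (pvLin j cnt).find? (fun q => table.getD q none == none) := by
  intro cnt
  induction cnt with
  | zero => intro j; rfl
  | succ c ih =>
    intro j
    rw [pvScanNoneFrom, pvLin, List.find?_cons]
    by_cases h : table.getD j none = none
    · simp only [List.getD] at h; simp [h]
    · simp only [List.getD] at h
      have hb : (table[j]?.getD none).isNone = false := by
        rw [Option.isNone_eq_false_iff, Option.isSome_iff_ne_none]; exact h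
      simp [List.getD, h, ih, hb]

lemma probe_lin (table : List (Option Int)) (key : Int) :
    ∀ (cnt j : Nat), pvProbeSlots key table j cnt
      = match (pvLin j cnt).find? (bHit table key) with
        | none => none
        | some q => match table.getD q none with
          | none => some (some q)
          | some _ => some none := by
  intro cnt
  induction cnt with
  | zero => intro j; rfl
  | succ c ih =>
    intro j
    rw [pvProbeSlots, pvLin, List.find?_cons]
    cases hj : table.getD j none with
    | none =>
      simp only [List.getD] at hj
      simp [bHit, List.getD, hj]
    | some e =>
      simp only [List.getD] at hj
      by_cases he : pvHashU e = pvHashU key ∧ e = key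
      · simp [bHit, List.getD, hj, he]
      · have hb : bHit table key j = false := by
          simp only [bHit, List.getD, hj]
          rw [Bool.and_eq_false_iff]
          rcases Decidable.not_and_iff_not_or_not.mp he with h1 | h1
          · exact Or.inl (by simpa using h1)
          · exact Or.inr (by simpa using h1)
        simp [List.getD, he, hb, ih]

lemma grow_fix (m : Nat) (l : List Nat) :
    ∀ (ns : Nat), ¬ ns ≤ m →
      l.foldl (fun ns _ => if ns ≤ m then ns * 2 else ns) ns = ns := by
  induction l with
  | nil => intro ns _; rfl
  | cons x l ih => intro ns h; rw [List.foldl_cons, if_neg h]; exact ih ns h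

lemma grow_gen (m : Nat) : ∀ (f ns : Nat),
    pvGrow f ns m = (List.range f).foldl (fun ns _ => if ns ≤ m then ns * 2 else ns) ns := by
  intro f
  induction f with
  | zero => intro ns; rfl
  | succ f ih =>
    intro ns
    rw [pvGrow, List.range_succ_eq_map, List.foldl_cons, List.foldl_map]
    by_cases hns : ns ≤ m
    · rw [if_pos hns, if_pos hns, ih]
    · rw [if_neg hns, if_neg hns, grow_fix m _ ns hns]

lemma grow_eq (m : Nat) : bGrow m = pvGrow 64 8 m := by
  rw [bGrow, grow_gen]

lemma cleanins_eq (k : Int) (t : List (Option Int)) :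
    ∀ (fuel i perturb : Nat), pvInsertClean k t fuel i perturb
      = match (bProbes t.length fuel i perturb).find? (fun q => t.getD q none == none) with
        | some j => t.set j (some k)
        | none => t := by
  intro fuel
  induction fuel with
  | zero => intro i p; rfl
  | succ f ih =>
    intro i p
    rw [pvInsertClean,
      show bProbes t.length (f+1) i p
        = bChunk t.length i ++ bProbes t.length f ((i*5 + 1 + p/32) % t.length) (p/32) from rfl,
      List.find?_append, chunk_eq, pvLin, List.find?_cons]
    by_cases hi : t.getD i none = none
    · simp only [List.getD] at hi
      simp [hi]
    · have hb : (t.getD i none == none) = false := by rw [beq_eq_false_iff_ne]; exact hi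
      rw [hb, if_neg hi]
      have hscan : (if i + 9 ≤ t.length - 1 then pvScanNoneFrom t (i+1) 9 else none)
          = (pvLin (i+1) (if i + 9 ≤ t.length - 1 then 9 else 0)).find?
              (fun q => t.getD q none == none) := by
        by_cases hg : i + 9 ≤ t.length - 1
        · rw [if_pos hg, if_pos hg, scan_lin]
        · rw [if_neg hg, if_neg hg]; rfl
      rw [hscan]
      cases hf : (pvLin (i+1) (if i + 9 ≤ t.length - 1 then 9 else 0)).find?
          (fun q => t.getD q none == none) with
      | some j => rfl
      | none => rw [Option.none_or]; exact ih _ _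

lemma fold_match_filterMap (f : List (Option Int) → Int → List (Option Int)) :
    ∀ (l : List (Option Int)) (t : List (Option Int)),
      l.foldl (fun t e => match e with | none => t | some k => f t k) t
        = (l.filterMap id).foldl f t := by
  intro l
  induction l with
  | nil => intro t; rfl
  | cons e l ih => intro t; cases e <;> simp [ih]

lemma resize_eq (st : PvSet) (m : Nat) : pvResize st m = bResize st m := by
  have hins : bCleanIns
      = fun t k => pvInsertClean k t (t.length + 64) (pvHashU k % t.length) (pvHashU k) := by
    funext t k
    rw [cleanins_eq]
    rfl
  unfold pvResize bResize
  rw [grow_eq, hins, ← fold_match_filterMap]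

lemma addloop_eq (key : Int) (st : PvSet) :
    ∀ (fuel i perturb : Nat), pvAddLoop key fuel st i perturb
      = match (bProbes st.table.length fuel i perturb).find? (bHit st.table key) with
        | none => st
        | some q =>
          match st.table.getD q none with
          | some _ => st
          | none =>
            if (st.fill + 1) * 5 ≥ (st.table.length - 1) * 3 then
              bResize { table := st.table.set q (some key), fill := st.fill + 1,
                        used := st.used + 1 }
                (if st.used + 1 > 50000 then (st.used + 1) * 2 else (st.used + 1) * 4)
            else { table := st.table.set q (some key), fill := st.fill + 1,
                   used := st.used + 1 } := by
  intro fuel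
  induction fuel with
  | zero => intro i p; rfl
  | succ f ih =>
    intro i p
    rw [pvAddLoop,
      show bProbes st.table.length (f+1) i p
        = bChunk st.table.length i
          ++ bProbes st.table.length f ((i*5 + 1 + p/32) % st.table.length) (p/32) from rfl,
      List.find?_append, chunk_eq, probe_lin]
    cases hf : (pvLin i ((if i + 9 ≤ st.table.length - 1 then 9 else 0) + 1)).find?
        (bHit st.table key) with
    | none => rw [Option.none_or]; exact ih _ _
    | some q =>
      rw [Option.some_or]
      cases hq : st.table.getD q none with
      | none => simp only [hq, resize_eq]
      | some e => simp only [hq]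

lemma setAdd_eq : bSetAdd = pvSetAdd := by
  funext st key
  rw [pvSetAdd, addloop_eq]
  rfl

-- B-side: the first-tier scoring pass equals A's per-ranking scoring pass-- B-side: the first-tier scoring pass equals A's per-ranking scoring pass
lemma scorepass_eq (rankings : List (List (List Int))) (d0 : PySem.Dict Int Int) :
    rankings.foldl (fun d ranking => (pvTop ranking).foldl (fun d item => d.modify item 0 (· + 1)) d) d0
      = rankings.foldl (fun d r => pvScoreRanking r d) d0 := by
  induction rankings generalizing d0 with
  | nil => rfl
  | cons r rs ih => simp only [List.foldl_cons, ih, scoreRanking_eq]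

-- B-side: the bucketing dict, read by descending score, yields the score classes
lemma alt_classes (rankings : List (List (List Int))) (d : PySem.Dict Int Int)
    (K : List Int) (h : d.items = K.map (fun k => (k, pvW rankings k))) :
    (PySem.List.sorted (d.items.foldl (fun g p => g.modify p.2 [] (· ++ [p.1]))
        (PySem.Dict.empty : PySem.Dict Int (List Int))).keys (fun s => s) true).map
        (fun s => (d.items.foldl (fun g p => g.modify p.2 [] (· ++ [p.1]))
          (PySem.Dict.empty : PySem.Dict Int (List Int))).getD s [])
      = pvClasses rankings K := by
  have hfold : d.items.foldl (fun g p => g.modify p.2 [] (· ++ [p.1]))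
        (PySem.Dict.empty : PySem.Dict Int (List Int))
      = (K.map (fun k => (pvW rankings k, k))).foldl
          (fun g q => g.modify q.1 [] (· ++ [q.2])) PySem.Dict.empty := by
    rw [show K.map (fun k => (pvW rankings k, k)) = d.items.map Prod.swap by
      rw [h, List.map_map]; rfl]
    rw [List.foldl_map]
    simp [Prod.swap]
  have hgetD : ∀ s, (d.items.foldl (fun g p => g.modify p.2 [] (· ++ [p.1]))
        (PySem.Dict.empty : PySem.Dict Int (List Int))).getD s []
      = K.filter (fun k => pvW rankings k == s) := by
    intro s
    rw [hfold, PySem.Dict.getD_foldl_modify_append, PySem.Dict.getD_empty, List.filter_map,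
      List.map_map]
    simp [Function.comp_def]
  have hkeys : (d.items.foldl (fun g p => g.modify p.2 [] (· ++ [p.1]))
        (PySem.Dict.empty : PySem.Dict Int (List Int))).keys
      = PySem.List.dedup (K.map (pvW rankings)) := by
    have h2 := PySem.Dict.keys_foldl_modify_key d.items (fun p => p.2) ([] : List Int)
      (fun g p => (· ++ [p.1])) PySem.Dict.empty
    simp only [PySem.Dict.keys_empty] at h2
    rw [h2, h, List.map_map, PySem.List.dedup_eq_ofList]
    rfl
  rw [hkeys]
  unfold pvClasses
  exact List.map_congr_left (fun s _ => hgetD s)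

-- ===== VERDICT (by name: the statement is the Claim_ definition above) =====
theorem plurality_sequential_loser_aggregation_spec : Claim_equal_plurality_sequential_loser_aggregation := by
  unfold Claim_equal_plurality_sequential_loser_aggregation
  intro rankings _hdom
  unfold Spec_plurality_sequential_loser_aggregation
  have hA : plurality_sequential_loser_aggregation rankings
      = pvLoserLoop rankings
          ((rankings.foldl (fun d ranking => if ranking ≠ [] then pvScoreRanking ranking d else d)
            (pvInitScores (pvCollectItems rankings))).size + 1)
          (rankings.foldl (fun d ranking => if ranking ≠ [] then pvScoreRanking ranking d else d)
            (pvInitScores (pvCollectItems rankings))) [] := rfl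
  rw [hA, guard_score]
  set d := rankings.foldl (fun d r => pvScoreRanking r d) (pvInitScores (pvCollectItems rankings)) with hd
  have hnd : d.keys.Nodup := by
    rw [hd]
    exact nodup_keys_spass _ _ (by rw [keys_init]; exact PySem.List.nodup_dedup _)
  have hval : ∀ k ∈ d.keys, d.getD k 0 = pvW rankings k := by
    intro k _
    rw [hd, getD_spass, getD_init]
    ring
  have hchar := dict_char rankings d hnd hval
  conv_lhs => rw [hchar]
  rw [loop_eq rankings ((PySem.Dict.mk (d.keys.map (fun k => (k, pvW rankings k)))).size + 1)
      d.keys [] hnd (by simp [PySem.Dict.size]), List.append_nil]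
  have hB : plurality_sequential_loser_aggregation_alt rankings
      = (PySem.List.sorted (d.items.foldl (fun g p => g.modify p.2 [] (· ++ [p.1]))
            (PySem.Dict.empty : PySem.Dict Int (List Int))).keys (fun s => s) true).map
          (fun s => (d.items.foldl (fun g p => g.modify p.2 [] (· ++ [p.1]))
            (PySem.Dict.empty : PySem.Dict Int (List Int))).getD s []) := by
    simp only [plurality_sequential_loser_aggregation_alt]
    rw [setAdd_eq, scorepass_eq, hd]
    simp only [pvInitScores, pvCollectItems]
  rw [hB]
  exact (alt_classes rankings d d.keys (by conv_lhs => rw [hchar])).symm
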